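-- pv_equiv track=rewrite | github.com/YangheHao-Jack/Tracklearning | vnet5.py | compute_start_positions
-- ===== SOURCE A (Python) =====
-- def compute_start_positions(volume_dim, patch_dim, step):
--     if patch_dim >= volume_dim:
--         return [0]
--     positions = []
--     start = 0
--     while True:
--         positions.append(start)
--         next_start = start + step
--         if next_start + patch_dim > volume_dim:
--             final_start = volume_dim - patch_dim
--             if final_start > start:
--                 positions.append(final_start)
--             break
--         start = next_start
--     return sorted(set(positions))
-- ===== SOURCE B (Python) =====
-- def compute_start_positions(volume_dim, patch_dim, step):
--     if patch_dim >= volume_dim: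
--         return [0]
--     L = volume_dim - patch_dim
--     q, r = divmod(L, step)
--     positions = [i * step for i in range(q + 1)]
--     if r:
--         positions.append(L)
--     return positions
-- ===== Notes on version B (the rewrite author's own statement) =====
-- stated objective: alternative
-- what changed: Replaces the while-True accumulation plus set-dedup plus sort by a closed-form construction: divmod computes how many step-multiples fit, the sorted list is built directly by multiplication, and the remainder decides whether the final position L is appended; no set and no sort are needed.
import Mathlib
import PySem

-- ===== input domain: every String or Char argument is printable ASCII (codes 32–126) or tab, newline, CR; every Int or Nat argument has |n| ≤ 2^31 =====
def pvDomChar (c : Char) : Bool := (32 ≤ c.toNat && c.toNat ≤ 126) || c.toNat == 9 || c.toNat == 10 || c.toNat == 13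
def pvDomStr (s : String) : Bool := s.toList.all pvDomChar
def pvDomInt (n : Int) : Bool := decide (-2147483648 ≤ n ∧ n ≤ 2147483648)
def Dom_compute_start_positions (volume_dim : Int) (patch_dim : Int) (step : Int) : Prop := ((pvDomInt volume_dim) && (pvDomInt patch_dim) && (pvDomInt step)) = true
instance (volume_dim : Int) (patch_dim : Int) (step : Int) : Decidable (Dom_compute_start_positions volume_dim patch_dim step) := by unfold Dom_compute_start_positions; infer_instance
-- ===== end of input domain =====

-- B replaces A's while-True accumulation + set-dedup + sort by a closed-form divmod construction
-- that builds the already-sorted position list directly (objective: alternative, sort-free).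

-- ===== PORT A =====
-- the while-True loop, step for step; the accumulator holds `positions` reversed (append = cons),
-- un-reversed once at the end; fuel only makes it total (Pre_ guarantees enough fuel)
def csp_loop (volume_dim : Int) (patch_dim : Int) (step : Int) : Nat → Int → List Int → List Int
  | 0, _, rpositions => rpositions
  | fuel + 1, start, rpositions =>
    let rpositions := start :: rpositions
    let next_start := start + step
    if next_start + patch_dim > volume_dim then
      let final_start := volume_dim - patch_dim
      if final_start > start then final_start :: rpositions else rpositions
    else csp_loop volume_dim patch_dim step fuel next_start rpositions

def compute_start_positions (volume_dim : Int) (patch_dim : Int) (step : Int) : List Int :=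
  if patch_dim ≥ volume_dim then [0]
  else
    PySem.List.sorted
      (PySem.Set.ofList
        (csp_loop volume_dim patch_dim step ((volume_dim - patch_dim).toNat + 1) 0 []).reverse)
      (fun x => x) false

-- ===== PORT B =====
def compute_start_positions_alt (volume_dim : Int) (patch_dim : Int) (step : Int) : List Int :=
  if patch_dim ≥ volume_dim then [0]
  else
    let L := volume_dim - patch_dim
    let q := PySem.Int.floordiv L step
    let r := PySem.Int.mod L step
    let positions := (PySem.List.pyRange 0 (q + 1) 1).map (fun i => i * step)
    if r ≠ 0 then positions ++ [L] else positions

-- ===== PRECONDITION & SPEC =====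
-- Pre_ excludes step ≤ 0 when patch_dim < volume_dim: there A's while loop never terminates (it returns no value).
def Pre_compute_start_positions (volume_dim : Int) (patch_dim : Int) (step : Int) : Prop :=
  patch_dim ≥ volume_dim ∨ 1 ≤ step
instance (volume_dim : Int) (patch_dim : Int) (step : Int) : Decidable (Pre_compute_start_positions volume_dim patch_dim step) := by unfold Pre_compute_start_positions; infer_instance

def pvWitness_compute_start_positions : Int × Int × Int := (10, 3, 2)

def Spec_compute_start_positions (volume_dim : Int) (patch_dim : Int) (step : Int) (out : List Int) : Prop := out = compute_start_positions_alt volume_dim patch_dim step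
instance (volume_dim : Int) (patch_dim : Int) (step : Int) (out : List Int) : Decidable (Spec_compute_start_positions volume_dim patch_dim step out) := by unfold Spec_compute_start_positions; infer_instance

-- ===== CLAIM (what is proved, stated in full; the proofs are below) =====
def Claim_equal_compute_start_positions : Prop := ∀ (volume_dim : Int) (patch_dim : Int) (step : Int), Dom_compute_start_positions volume_dim patch_dim step → Pre_compute_start_positions volume_dim patch_dim step → Spec_compute_start_positions volume_dim patch_dim step (compute_start_positions volume_dim patch_dim step)

-- ===== LEMMAS AND PROOFS =====

-- range(a, b, s) with 0 < s is empty when b ≤ a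
theorem pyRange_pos_nil (a b : Int) {s : Int} (hs : 0 < s) (hab : b ≤ a) :
    PySem.List.pyRange a b s = [] := by
  rw [PySem.List.pyRange_of_pos a b hs]
  simp [show ¬ a < b by omega]

-- range(a, b, s) with 0 < s and a < b starts at a
theorem pyRange_pos_cons (a b : Int) {s : Int} (hs : 0 < s) (hab : a < b) :
    PySem.List.pyRange a b s = a :: PySem.List.pyRange (a + s) b s := by
  rw [PySem.List.pyRange_of_pos a b hs, PySem.List.pyRange_of_pos (a + s) b hs]
  by_cases h2 : a + s < b
  · have hN : ((b - a + s - 1) / s).toNat = ((b - (a + s) + s - 1) / s).toNat + 1 := by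
      have e : (b - a + s - 1) = (b - (a + s) + s - 1) + 1 * s := by ring
      rw [e, Int.add_mul_ediv_right _ _ (by omega : s ≠ 0)]
      have h0 : 0 ≤ (b - (a + s) + s - 1) / s := Int.ediv_nonneg (by omega) (by omega)
      omega
    rw [if_pos hab, if_pos h2, hN, List.range_succ_eq_map, List.map_cons, List.map_map]
    congr 1
    · simp
    · apply List.map_congr_left
      intro k _
      simp only [Function.comp]
      push_cast
      ring
  · have hdiv : (b - a + s - 1) / s = 1 := by
      have h1 : (b - a - 1) / s = 0 := Int.ediv_eq_zero_of_lt (by omega) (by omega)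
      have e : (b - a + s - 1) = (b - a - 1) + 1 * s := by ring
      rw [e, Int.add_mul_ediv_right _ _ (by omega : s ≠ 0), h1]
      norm_num
    simp [if_pos hab, if_neg h2, hdiv]

theorem dvd_small_iff {s m : Int} (_hs : 0 < s) (h0 : 0 ≤ m) (hm : m < s) : s ∣ m ↔ m = 0 := by
  constructor
  · intro h
    have h1 : m % s = 0 := Int.emod_eq_zero_of_dvd h
    have h2 : m % s = m := Int.emod_eq_of_lt h0 hm
    omega
  · rintro rfl; exact dvd_zero s

-- the loop, characterised: it emits (reversed) range(start, L+1, step), plus a trailing L when step ∤ (L - start)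
theorem csp_loop_eq (volume_dim patch_dim step : Int) (hs : 1 ≤ step) :
    ∀ (fuel : Nat) (start : Int) (acc : List Int),
    start ≤ volume_dim - patch_dim →
    (volume_dim - patch_dim - start).toNat < fuel →
    csp_loop volume_dim patch_dim step fuel start acc =
      (PySem.List.pyRange start (volume_dim - patch_dim + 1) step ++
        (if step ∣ (volume_dim - patch_dim - start) then [] else [volume_dim - patch_dim])).reverse ++ acc := by
  intro fuel
  induction fuel with
  | zero => intro start acc _ hf; omega
  | succ fuel ih =>
    intro start acc hstart hf
    simp only [csp_loop]
    by_cases hbrk : start + step + patch_dim > volume_dim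
    · rw [if_pos hbrk]
      have hr1 : PySem.List.pyRange start (volume_dim - patch_dim + 1) step =
          start :: PySem.List.pyRange (start + step) (volume_dim - patch_dim + 1) step :=
        pyRange_pos_cons _ _ (by omega) (by omega)
      have hr2 : PySem.List.pyRange (start + step) (volume_dim - patch_dim + 1) step = [] :=
        pyRange_pos_nil _ _ (by omega) (by omega)
      have hdvd : step ∣ (volume_dim - patch_dim - start) ↔ volume_dim - patch_dim - start = 0 :=
        dvd_small_iff (by omega) (by omega) (by omega)
      by_cases hfin : volume_dim - patch_dim > start
      · rw [if_pos hfin, hr1, hr2, if_neg (fun h => absurd (hdvd.mp h) (by omega))]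
        simp
      · rw [if_neg hfin, hr1, hr2, if_pos (hdvd.mpr (by omega))]
        simp
    · rw [if_neg hbrk]
      rw [ih (start + step) (start :: acc) (by omega) (by omega)]
      have hr : PySem.List.pyRange start (volume_dim - patch_dim + 1) step =
          start :: PySem.List.pyRange (start + step) (volume_dim - patch_dim + 1) step :=
        pyRange_pos_cons _ _ (by omega) (by omega)
      have hdvd : (step ∣ (volume_dim - patch_dim - (start + step))) ↔
          (step ∣ (volume_dim - patch_dim - start)) := by
        constructor
        · intro h
          have h2 := dvd_add h (dvd_refl step)
          simpa [show volume_dim - patch_dim - (start + step) + step =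
            volume_dim - patch_dim - start by ring] using h2
        · intro h
          have h2 := dvd_sub h (dvd_refl step)
          simpa [show volume_dim - patch_dim - start - step =
            volume_dim - patch_dim - (start + step) by ring] using h2
      rw [hr]
      simp [hdvd]

-- A's range over step-multiples IS B's mapped unit range (q = L // step)
theorem range_factor (L step : Int) (hs : 1 ≤ step) (hL : 1 ≤ L) :
    PySem.List.pyRange 0 (L + 1) step =
      (PySem.List.pyRange 0 (PySem.Int.floordiv L step + 1) 1).map (fun i => i * step) := by
  rw [PySem.List.pyRange_of_pos 0 (L + 1) (by omega), PySem.List.pyRange_one,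
    List.map_map, PySem.Int.floordiv_eq_ediv_of_pos (by omega)]
  have hN : (L + 1 - 0 + step - 1) / step = L / step + 1 := by
    have e : (L + 1 - 0 + step - 1) = L + 1 * step := by ring
    rw [e, Int.add_mul_ediv_right _ _ (by omega : step ≠ 0)]
  rw [if_pos (by omega : (0:Int) < L + 1), hN,
    show L / step + 1 - 0 = L / step + 1 by ring]
  apply List.map_congr_left
  intro k _
  simp only [Function.comp]
  ring

-- sorted(set(xs)) of a strictly increasing list is the list itself
theorem sorted_set_eq_self (xs : List Int) (h : xs.Pairwise (· < ·)) :
    PySem.List.sorted (PySem.Set.ofList xs) (fun x => x) false = xs := by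
  rw [PySem.Set.ofList_eq_self_of_nodup xs (h.imp ne_of_lt)]
  exact PySem.List.sorted_eq_self_of_pairwise xs _ (h.imp le_of_lt)

theorem mapped_pairwise (q step : Int) (hs : 1 ≤ step) :
    ((PySem.List.pyRange 0 (q + 1) 1).map (fun i => i * step)).Pairwise (· < ·) := by
  rw [List.pairwise_map]
  exact (PySem.List.pairwise_lt_pyRange_one 0 (q + 1)).imp
    (fun hij => by nlinarith)

-- ===== VERDICT (by name: the statement is the Claim_ definition above) =====
theorem compute_start_positions_spec : Claim_equal_compute_start_positions := by
  intro volume_dim patch_dim step _ hpre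
  unfold Spec_compute_start_positions compute_start_positions compute_start_positions_alt
  by_cases hguard : patch_dim ≥ volume_dim
  · rw [if_pos hguard, if_pos hguard]
  · rw [if_neg hguard, if_neg hguard]
    have hs : 1 ≤ step := hpre.resolve_left hguard
    have hL : 1 ≤ volume_dim - patch_dim := by omega
    set L := volume_dim - patch_dim with hLdef
    set q := PySem.Int.floordiv L step with hq
    rw [csp_loop_eq volume_dim patch_dim step hs (L.toNat + 1) 0 [] (by omega) (by omega)]
    simp only [List.append_nil, List.reverse_reverse, sub_zero, ← hLdef]
    rw [range_factor L step hs hL, ← hq]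
    have hqb : q * step ≤ L ∧ L < (q + 1) * step :=
      (PySem.Int.floordiv_eq_iff_of_pos (by omega)).mp hq.symm
    have hrdvd : (PySem.Int.mod L step ≠ 0) ↔ ¬ step ∣ L := by
      rw [ne_eq, PySem.Int.mod_eq_zero_iff_dvd]
    by_cases hdvd : step ∣ L
    · rw [if_pos hdvd, if_neg (fun h => (hrdvd.mp h) hdvd), List.append_nil]
      exact sorted_set_eq_self _ (mapped_pairwise q step hs)
    · rw [if_neg hdvd, if_pos (hrdvd.mpr hdvd)]
      apply sorted_set_eq_self
      rw [List.pairwise_append]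
      refine ⟨mapped_pairwise q step hs, List.pairwise_singleton _ _, ?_⟩
      intro x hx y hy
      simp only [List.mem_singleton] at hy
      subst hy
      obtain ⟨i, hi, rfl⟩ := List.mem_map.mp hx
      rw [PySem.List.mem_pyRange_one] at hi
      have h1 : i * step ≤ q * step := mul_le_mul_of_nonneg_right (by omega) (by omega)
      have h2 : q * step < L :=
        lt_of_le_of_ne hqb.1 (fun h => hdvd ⟨q, (mul_comm q step ▸ h).symm⟩)
      linarith
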